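-- pv_equiv track=rewrite | github.com/nburnykov/algo | dynamic/opt_bst/opt_bst.py | index_list
-- ===== SOURCE A (Python) =====
-- from typing import List, Dict
--
-- def index_list(width_height: int, offset: int) -> List[tuple]:
--     """
--     Right order of weight and root matrix indexes to calculate
--
--     :param width_height: dimensions of square matrix
--     :param offset: offset to start
--     :return: list of indices
--     """
--     i = 0
--     j = offset
--     result = []
--     while not (i == 0 and j == width_height):
--         result.append((i, j))
--         j += 1
--         i += 1
--         if j == width_height:
--             offset += 1
--             i = 0
--             j = offset
--     return result
-- ===== SOURCE B (Python) =====
-- def index_list(width_height: int, offset: int):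
--     """Enumerate the cells row by row, then sort them into diagonal order
--     by the key (diagonal index, row index)."""
--     cells = [(i, j)
--              for i in range(max(0, width_height - offset))
--              for j in range(i + offset, width_height)]
--     return sorted(cells, key=lambda p: (p[1] - p[0], p[0]))
-- ===== Notes on version B (the rewrite author's own statement) =====
-- stated objective: alternative
-- what changed: Instead of walking the diagonals with a flat while-loop and a manual wrap counter, B enumerates the matrix cells row by row and then sorts them into diagonal order with the key (j - i, i); correctness rests on the diagonal order being exactly the key-sorted order of that cell set.
import Mathlib
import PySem

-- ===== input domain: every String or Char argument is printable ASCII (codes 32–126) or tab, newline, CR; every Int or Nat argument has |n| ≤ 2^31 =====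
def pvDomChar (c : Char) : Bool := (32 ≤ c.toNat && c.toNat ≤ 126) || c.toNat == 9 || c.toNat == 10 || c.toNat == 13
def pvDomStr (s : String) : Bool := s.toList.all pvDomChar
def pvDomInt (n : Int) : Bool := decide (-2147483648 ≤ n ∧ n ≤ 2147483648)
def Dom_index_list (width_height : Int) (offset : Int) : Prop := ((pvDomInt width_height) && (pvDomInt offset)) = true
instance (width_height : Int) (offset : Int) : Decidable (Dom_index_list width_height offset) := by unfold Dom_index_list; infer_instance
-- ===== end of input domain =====

-- B replaces A's diagonal walk (flat while-loop with a manual wrap counter) by a different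
-- algorithm: enumerate the cells row by row, then sort them into diagonal order by the key
-- (j - i, i) (objective: alternative). Equivalence is proved on offset ≤ width_height,
-- exactly the inputs on which A terminates.

-- ===== PORT A =====
-- A's while-loop, step for step; the final 'else result' guard only makes the function total:
-- any state it cuts off is one from which Python's A loops forever (excluded by Pre_).
def indexListLoopA (wh : Int) (offset : Int) (i : Int) (j : Int) (result : List (Int × Int)) :
    List (Int × Int) :=
  if i = 0 ∧ j = wh then result
  else if _h : offset ≤ j ∧ j < wh then
    if j + 1 = wh then indexListLoopA wh (offset + 1) 0 (offset + 1) (result ++ [(i, j)])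
    else indexListLoopA wh offset (i + 1) (j + 1) (result ++ [(i, j)])
  else result
termination_by ((wh - offset).toNat, (wh - j).toNat)
decreasing_by
  · exact Prod.Lex.left _ _ (by omega)
  · exact Prod.Lex.right _ (by omega)

def index_list (width_height : Int) (offset : Int) : List (Int × Int) :=
  indexListLoopA width_height offset 0 offset []

-- ===== PORT B =====
def index_list_alt (width_height : Int) (offset : Int) : List (Int × Int) :=
  let cells :=
    (PySem.List.pyRange 0 (max 0 (width_height - offset)) 1).foldl
      (fun acc i =>
        (PySem.List.pyRange (i + offset) width_height 1).foldl
          (fun acc j => acc ++ [(i, j)]) acc)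
      []
  PySem.List.sorted2 cells (fun p => p.2 - p.1) (fun p => p.1) false

-- ===== PRECONDITION & SPEC =====
-- Pre_ excludes exactly the inputs with offset > width_height, on which Python's A never
-- terminates (its while-loop can then never reach the stop state); A returns no value there.
def Pre_index_list (width_height : Int) (offset : Int) : Prop := offset ≤ width_height
instance (width_height : Int) (offset : Int) : Decidable (Pre_index_list width_height offset) := by
  unfold Pre_index_list; infer_instance

def pvWitness_index_list : Int × Int := (3, 0)

def Spec_index_list (width_height : Int) (offset : Int) (out : List (Int × Int)) : Prop :=
  out = index_list_alt width_height offset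
instance (width_height : Int) (offset : Int) (out : List (Int × Int)) :
    Decidable (Spec_index_list width_height offset out) := by
  unfold Spec_index_list; infer_instance

-- ===== CLAIM (what is proved, stated in full; the proofs are below) =====
def Claim_equal_index_list : Prop := ∀ (width_height : Int) (offset : Int), Dom_index_list width_height offset → Pre_index_list width_height offset → Spec_index_list width_height offset (index_list width_height offset)

-- ===== LEMMAS AND PROOFS =====

-- the diagonal-order list both programs produce
def diagList (wh offset : Int) : List (Int × Int) :=
  (PySem.List.pyRange offset wh 1).flatMap
    (fun d => (PySem.List.pyRange 0 (wh - d) 1).map (fun i => (i, d + i)))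

-- the row-major cell list B builds before sorting
def rowList (wh offset : Int) : List (Int × Int) :=
  (PySem.List.pyRange 0 (max 0 (wh - offset)) 1).flatMap
    (fun i => (PySem.List.pyRange (i + offset) wh 1).map (fun j => (i, j)))

-- B's sort key, as one lexicographic value
def diagKey (p : Int × Int) : Lex (Int × Int) := toLex (p.2 - p.1, p.1)

-- ---- A = diagList ----

-- diagonal starting at column j (row j - offset) down to the wrap, as one map
lemma loopA_diag (wh offset : Int) : ∀ (n : Nat) (j : Int) (acc : List (Int × Int)),
    (wh - j).toNat = n → offset ≤ j → j < wh →
    indexListLoopA wh offset (j - offset) j acc =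
      indexListLoopA wh (offset + 1) 0 (offset + 1)
        (acc ++ (PySem.List.pyRange 0 (wh - j) 1).map (fun t => (j - offset + t, j + t))) := by
  intro n
  induction n with
  | zero => intro j acc hn h1 h2; omega
  | succ m ih =>
    intro j acc hn h1 h2
    rw [indexListLoopA]
    have hstop : ¬ (j - offset = 0 ∧ j = wh) := by omega
    rw [if_neg hstop, dif_pos ⟨h1, h2⟩]
    by_cases hw : j + 1 = wh
    · rw [if_pos hw]
      have : wh - j = 0 + 1 := by omega
      rw [this, PySem.List.pyRange_one_singleton]
      simp
    · rw [if_neg hw]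
      have hij : j + 1 - offset = j - offset + 1 := by omega
      have := ih (j + 1) (acc ++ [(j - offset, j)]) (by omega) (by omega) (by omega)
      rw [hij] at this
      rw [this]
      congr 1
      have hcons : PySem.List.pyRange 0 (wh - j) 1 = 0 :: PySem.List.pyRange 1 (wh - j) 1 :=
        PySem.List.pyRange_one_cons (by omega)
      rw [hcons]
      simp only [List.map_cons, List.append_assoc, List.singleton_append, add_zero]
      congr 2
      rw [PySem.List.pyRange_one, PySem.List.pyRange_one, List.map_map, List.map_map]
      have : wh - j - 1 = wh - (j + 1) - 0 := by omega
      rw [this]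
      apply List.map_congr_left
      intro k _
      simp only [Function.comp_apply]
      refine Prod.ext ?_ ?_ <;> simp <;> omega

-- the whole loop, from a fresh diagonal start, as the flatMap over remaining diagonals
lemma loopA_flat (wh : Int) : ∀ (n : Nat) (offset : Int) (acc : List (Int × Int)),
    (wh - offset).toNat = n → offset ≤ wh →
    indexListLoopA wh offset 0 offset acc = acc ++ diagList wh offset := by
  intro n
  induction n with
  | zero =>
    intro offset acc hn h
    have heq : offset = wh := by omega
    rw [indexListLoopA, if_pos ⟨rfl, heq⟩]
    unfold diagList
    rw [PySem.List.pyRange_one_eq_nil (by omega)]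
    simp
  | succ m ih =>
    intro offset acc hn h
    have hlt : offset < wh := by omega
    have hd := loopA_diag wh offset (wh - offset).toNat offset acc rfl le_rfl hlt
    simp only [sub_self, zero_add] at hd
    rw [hd, ih (offset + 1) _ (by omega) (by omega)]
    unfold diagList
    rw [PySem.List.pyRange_one_cons hlt, List.flatMap_cons, List.append_assoc]

-- ---- B = sorted(rowList) ----

lemma cells_eq_rowList (wh offset : Int) :
    (PySem.List.pyRange 0 (max 0 (wh - offset)) 1).foldl
      (fun acc i =>
        (PySem.List.pyRange (i + offset) wh 1).foldl
          (fun acc j => acc ++ [(i, j)]) acc)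
      [] = rowList wh offset := by
  unfold rowList
  simp only [PySem.List.foldl_append_singleton_eq_map]
  rw [PySem.List.foldl_append_eq_flatMap]
  simp

-- sorted2 with keys (k1, k2) is sorted with the single lexicographic key
lemma sorted2_eq_sorted_lex (xs : List (Int × Int)) :
    PySem.List.sorted2 xs (fun p => p.2 - p.1) (fun p => p.1) false =
      PySem.List.sorted xs diagKey false := by
  have hcmp : ∀ a b : Int × Int,
      (decide (a.2 - a.1 < b.2 - b.1) ||
        (!decide (b.2 - b.1 < a.2 - a.1) && decide (a.1 < b.1))) =
      decide (diagKey a < diagKey b) := by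
    intro a b
    by_cases h1 : a.2 - a.1 < b.2 - b.1
    · have : diagKey a < diagKey b := by
        simp only [diagKey, Prod.Lex.lt_iff, ofLex_toLex]
        exact Or.inl h1
      simp [h1, this]
    · by_cases h2 : b.2 - b.1 < a.2 - a.1
      · have : ¬ diagKey a < diagKey b := by
          simp only [diagKey, Prod.Lex.lt_iff, ofLex_toLex]
          push Not
          exact ⟨by omega, fun h => by omega⟩
        simp [h1, h2, this]
      · have he : a.2 - a.1 = b.2 - b.1 := by omega
        by_cases h3 : a.1 < b.1
        · have : diagKey a < diagKey b := by
            simp only [diagKey, Prod.Lex.lt_iff, ofLex_toLex]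
            exact Or.inr ⟨he, h3⟩
          simp [h1, h2, h3, this]
        · have : ¬ diagKey a < diagKey b := by
            simp only [diagKey, Prod.Lex.lt_iff, ofLex_toLex]
            push Not
            exact ⟨by omega, fun _ => by omega⟩
          simp [h1, h2, h3, this]
  unfold PySem.List.sorted2 PySem.List.sorted
  simp only [hcmp, Bool.false_eq_true, if_false]

-- membership characterisations
lemma mem_diagList (wh offset : Int) (x : Int × Int) :
    x ∈ diagList wh offset ↔ 0 ≤ x.1 ∧ x.1 + offset ≤ x.2 ∧ x.2 < wh := by
  unfold diagList
  simp only [List.mem_flatMap, List.mem_map, PySem.List.mem_pyRange_one]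
  constructor
  · rintro ⟨d, hd, i, hi, rfl⟩
    refine ⟨hi.1, ?_, ?_⟩
    · show i + offset ≤ d + i; omega
    · show d + i < wh; omega
  · rintro ⟨h1, h2, h3⟩
    refine ⟨x.2 - x.1, ⟨by omega, by omega⟩, x.1, ⟨by omega, by omega⟩, ?_⟩
    show (x.1, x.2 - x.1 + x.1) = x
    have hx : x.2 - x.1 + x.1 = x.2 := by omega
    rw [hx]

lemma mem_rowList (wh offset : Int) (x : Int × Int) :
    x ∈ rowList wh offset ↔ 0 ≤ x.1 ∧ x.1 + offset ≤ x.2 ∧ x.2 < wh := by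
  unfold rowList
  simp only [List.mem_flatMap, List.mem_map, PySem.List.mem_pyRange_one]
  constructor
  · rintro ⟨i, hi, j, hj, rfl⟩
    exact ⟨hi.1, by omega, hj.2⟩
  · rintro ⟨h1, h2, h3⟩
    refine ⟨x.1, ⟨h1, ?_⟩, x.2, ⟨by omega, h3⟩, rfl⟩
    have := le_max_right 0 (wh - offset)
    omega

-- pyRange 0 n is strictly increasing
lemma pairwise_pyRange (a b : Int) :
    (PySem.List.pyRange a b 1).Pairwise (fun x y => x < y) := by
  rw [PySem.List.pyRange_one, List.pairwise_map]
  exact List.pairwise_lt_range.imp (by intro u v h; omega)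

-- the diagonal list is strictly increasing in the key
lemma diagList_pairwise (wh offset : Int) :
    (diagList wh offset).Pairwise (fun a b => diagKey a < diagKey b) := by
  unfold diagList
  rw [List.pairwise_flatMap]
  constructor
  · intro d _
    rw [List.pairwise_map]
    refine (pairwise_pyRange 0 (wh - d)).imp ?_
    intro u v h
    simp only [diagKey, Prod.Lex.lt_iff, ofLex_toLex]
    exact Or.inr ⟨by omega, h⟩
  · refine (pairwise_pyRange offset wh).imp ?_
    intro d d' hdd x hx y hy
    rw [List.mem_map] at hx hy
    obtain ⟨i, hi, rfl⟩ := hx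
    obtain ⟨i', hi', rfl⟩ := hy
    simp only [diagKey, Prod.Lex.lt_iff, ofLex_toLex]
    exact Or.inl (by omega)

-- the row-major list has pairwise-distinct elements
lemma rowList_nodup (wh offset : Int) : (rowList wh offset).Nodup := by
  unfold rowList List.Nodup
  rw [List.pairwise_flatMap]
  constructor
  · intro i _
    rw [List.pairwise_map]
    refine (pairwise_pyRange (i + offset) wh).imp ?_
    intro u v h heq
    exact absurd (congrArg Prod.snd heq) (by simpa using (by omega : ¬ u = v))
  · refine (pairwise_pyRange 0 (max 0 (wh - offset))).imp ?_
    intro i i' hii x hx y hy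
    rw [List.mem_map] at hx hy
    obtain ⟨j, hj, rfl⟩ := hx
    obtain ⟨j', hj', rfl⟩ := hy
    intro heq
    exact absurd (congrArg Prod.fst heq) (by simpa using (by omega : ¬ i = i'))

lemma diagList_nodup (wh offset : Int) : (diagList wh offset).Nodup := by
  unfold List.Nodup
  refine (diagList_pairwise wh offset).imp ?_
  intro a b h hab
  rw [hab] at h
  exact lt_irrefl _ h

lemma diagList_perm_rowList (wh offset : Int) :
    (diagList wh offset).Perm (rowList wh offset) := by
  rw [List.perm_ext_iff_of_nodup (diagList_nodup wh offset) (rowList_nodup wh offset)]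
  intro x
  rw [mem_diagList, mem_rowList]

lemma alt_eq_diag (wh offset : Int) :
    index_list_alt wh offset = diagList wh offset := by
  unfold index_list_alt
  rw [cells_eq_rowList, sorted2_eq_sorted_lex]
  exact PySem.List.sorted_eq_of_perm_of_pairwise_lt _ _ diagKey
    (diagList_perm_rowList wh offset) (diagList_pairwise wh offset)

-- ===== VERDICT (by name: the statement is the Claim_ definition above) =====
theorem index_list_spec : Claim_equal_index_list := by
  intro wh offset _ hpre
  unfold Spec_index_list index_list
  rw [loopA_flat wh (wh - offset).toNat offset [] rfl hpre, alt_eq_diag]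
  simp
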